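-- pv_equiv track=rewrite | github.com/LunrEclipse/61a | Projects/cats/cats.py | feline_flips
-- ===== SOURCE A (Python) =====
-- def feline_flips(start, goal, limit):
--     """A diff function for autocorrect that determines how many letters
--     in START need to be substituted to create GOAL, then adds the difference in
--     their lengths and returns the result.
--
--     Arguments:
--         start: a starting word
--         goal: a string representing a desired goal word
--         limit: a number representing an upper bound on the number of chars that must change
--
--     >>> big_limit = 10
--     >>> feline_flips("nice", "rice", big_limit)    # Substitute: n -> r
--     1
--     >>> feline_flips("range", "rungs", big_limit)  # Substitute: a -> u, e -> s
--     2
--     >>> feline_flips("pill", "pillage", big_limit) # Don't substitute anything, length difference of 3.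
--     3
--     >>> feline_flips("roses", "arose", big_limit)  # Substitute: r -> a, o -> r, s -> o, e -> s, s -> e
--     5
--     >>> feline_flips("rose", "hello", big_limit)   # Substitute: r->h, o->e, s->l, e->l, length difference of 1.
--     5
--     """
--     # BEGIN PROBLEM 6
--     if len(start) == 0 and len(goal) == 0:
--         return 0
--     if len(start) == 0 or len(goal) == 0:
--         if limit == 0:
--             return 1
--         elif len(start) == 0:
--             return 1 + feline_flips(start, goal[1:], limit-1)
--         elif len(goal) == 0:
--             return 1 + feline_flips(start[1:], goal, limit-1)
--     else:
--         if start[0] == goal[0]: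
--             return feline_flips(start[1:], goal[1:], limit)
--         else:
--             if limit == 0:
--                 return 1
--             else:
--                 return 1 + feline_flips(start[1:], goal[1:], limit-1)
-- ===== SOURCE B (Python) =====
-- def feline_flips(start, goal, limit):
--     d = sum(a != b for a, b in zip(start, goal)) + abs(len(start) - len(goal))
--     return limit + 1 if 0 <= limit < d else d
-- ===== Notes on version B (the rewrite author's own statement) =====
-- stated objective: simpler
-- what changed: Replaced A's recursive limit-countdown with a flat one-pass mismatch count over zip(start, goal) plus the length difference, then a single conditional cap (limit+1 when 0 <= limit < d, else d).
import Mathlib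
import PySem

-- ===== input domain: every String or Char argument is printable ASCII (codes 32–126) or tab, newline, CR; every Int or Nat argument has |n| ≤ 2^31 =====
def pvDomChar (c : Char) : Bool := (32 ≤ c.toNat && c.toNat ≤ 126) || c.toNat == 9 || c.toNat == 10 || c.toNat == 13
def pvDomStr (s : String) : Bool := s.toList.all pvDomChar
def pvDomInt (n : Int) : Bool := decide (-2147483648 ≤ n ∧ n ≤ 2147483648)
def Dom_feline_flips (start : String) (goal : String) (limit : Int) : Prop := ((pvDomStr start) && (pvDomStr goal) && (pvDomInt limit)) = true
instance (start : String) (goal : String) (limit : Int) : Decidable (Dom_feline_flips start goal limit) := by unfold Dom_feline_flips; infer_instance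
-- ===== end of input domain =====

-- B replaces A's recursive limit-countdown by a flat mismatch count plus a single conditional cap (simpler, one pass, no recursion).

-- ===== PORT A =====
-- literal transliteration of A's recursion; strings are consumed from the front as char lists (start[1:] = tail)
def felineA : List Char → List Char → Int → Int
  | [], [], _ => 0
  | [], _ :: gs, limit => if limit = 0 then 1 else 1 + felineA [] gs (limit - 1)
  | _ :: ss, [], limit => if limit = 0 then 1 else 1 + felineA ss [] (limit - 1)
  | s :: ss, g :: gs, limit =>
      if s = g then felineA ss gs limit
      else if limit = 0 then 1 else 1 + felineA ss gs (limit - 1)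

def feline_flips (start : String) (goal : String) (limit : Int) : Int :=
  felineA start.toList goal.toList limit

-- ===== PORT B =====
-- Source B: d = sum(a != b for a, b in zip(start, goal)) + abs(len(start) - len(goal)); limit+1 if 0 <= limit < d else d
def feline_flips_alt (start : String) (goal : String) (limit : Int) : Int :=
  let d : Int := ((start.toList.zip goal.toList).foldl
      (fun acc p => acc + (if p.1 ≠ p.2 then (1 : Int) else 0)) 0)
    + (((start.toList.length : Int) - (goal.toList.length : Int)).natAbs : Int)
  if 0 ≤ limit ∧ limit < d then limit + 1 else d

-- ===== PRECONDITION & SPEC =====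
def Spec_feline_flips (start : String) (goal : String) (limit : Int) (out : Int) : Prop := out = feline_flips_alt start goal limit
instance (start : String) (goal : String) (limit : Int) (out : Int) : Decidable (Spec_feline_flips start goal limit out) := by unfold Spec_feline_flips; infer_instance

-- ===== CLAIM (what is proved, stated in full; the proofs are below) =====
def Claim_equal_feline_flips : Prop := ∀ (start : String) (goal : String) (limit : Int), Dom_feline_flips start goal limit → Spec_feline_flips start goal limit (feline_flips start goal limit)

-- ===== LEMMAS AND PROOFS =====

-- the uncapped edit count: mismatches in the common prefix plus the length difference
def pvD : List Char → List Char → Int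
  | [], [] => 0
  | [], _ :: gs => 1 + pvD [] gs
  | _ :: ss, [] => 1 + pvD ss []
  | s :: ss, g :: gs => (if s = g then 0 else 1) + pvD ss gs

theorem pvD_nil_left (g : List Char) : pvD [] g = (g.length : Int) := by
  induction g with
  | nil => simp [pvD]
  | cons x xs ih => simp [pvD, ih]; omega

theorem pvD_nil_right (s : List Char) : pvD s [] = (s.length : Int) := by
  induction s with
  | nil => simp [pvD]
  | cons x xs ih => simp [pvD, ih]; omega

theorem pvD_nonneg (s g : List Char) : 0 ≤ pvD s g := by
  induction s generalizing g with
  | nil => rw [pvD_nil_left]; positivity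
  | cons x ss ih =>
    cases g with
    | nil => rw [pvD_nil_right]; positivity
    | cons y gs => simp only [pvD]; have := ih gs; split <;> omega

theorem pvFoldl_shift (l : List (Char × Char)) (a : Int) :
    l.foldl (fun acc p => acc + (if p.1 ≠ p.2 then (1 : Int) else 0)) a
      = a + l.foldl (fun acc p => acc + (if p.1 ≠ p.2 then (1 : Int) else 0)) 0 := by
  induction l generalizing a with
  | nil => simp
  | cons p l ih => simp only [List.foldl_cons]; rw [ih, ih (0 + _)]; ring

theorem pvD_eq_zip (s g : List Char) :
    (s.zip g).foldl (fun acc p => acc + (if p.1 ≠ p.2 then (1 : Int) else 0)) 0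
      + (((s.length : Int) - (g.length : Int)).natAbs : Int) = pvD s g := by
  induction s generalizing g with
  | nil => simp [pvD_nil_left]
  | cons x ss ih =>
    cases g with
    | nil => simp [pvD_nil_right]; omega
    | cons y gs =>
      simp only [List.zip_cons_cons, List.foldl_cons, pvD, List.length_cons]
      rw [pvFoldl_shift]
      have h2 := ih gs
      simp only [ne_eq, ite_not] at h2
      by_cases h : x = y
      · simp only [h, ne_eq, ite_not, zero_add]
        omega
      · simp only [ne_eq, ite_not, if_neg h, zero_add]
        omega

theorem felineA_eq (s g : List Char) (L : Int) :
    felineA s g L = if 0 ≤ L ∧ L < pvD s g then L + 1 else pvD s g := by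
  induction s generalizing g L with
  | nil =>
    induction g generalizing L with
    | nil => simp [felineA, pvD]
    | cons y gs ih =>
      have hn := pvD_nonneg ([] : List Char) gs
      simp only [felineA, pvD]
      rw [ih]
      split_ifs <;> omega
  | cons x ss ih =>
    cases g with
    | nil =>
      have hn := pvD_nonneg ss ([] : List Char)
      simp only [felineA, pvD]
      rw [ih]
      split_ifs <;> omega
    | cons y gs =>
      have hn := pvD_nonneg ss gs
      simp only [felineA, pvD]
      by_cases h : x = y
      · rw [if_pos h, ih]; simp [h]
      · rw [if_neg h, ih]; simp only [h, ite_false]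
        split_ifs <;> omega

-- ===== VERDICT (by name: the statement is the Claim_ definition above) =====
theorem feline_flips_spec : Claim_equal_feline_flips := by
  intro start goal limit _
  unfold Spec_feline_flips feline_flips feline_flips_alt
  rw [felineA_eq, pvD_eq_zip]
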